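-- pv_equiv track=rewrite | github.com/mosh3eb/merlin | merlin/core/state.py | _generate_periodic_state
-- ===== SOURCE A (Python) =====
-- def _generate_periodic_state(n_modes: int, n_photons: int) -> list[int]:
--     if n_photons == 0:
--         return [0] * n_modes
--
--     bits = [1 if idx % 2 == 0 else 0 for idx in range(min(n_photons * 2, n_modes))]
--     count = sum(bits)
--     idx = 0
--
--     while count < n_photons and idx < n_modes:
--         if idx >= len(bits):
--             bits.append(0)
--
--         if bits[idx] == 0:
--             bits[idx] = 1
--             count += 1
--
--         idx += 1
--
--     return bits + [0] * (n_modes - len(bits))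
-- ===== SOURCE B (Python) =====
-- def _generate_periodic_state(n_modes: int, n_photons: int) -> list[int]:
--     order = list(range(0, n_modes, 2)) + list(range(1, n_modes, 2))
--     k = max(0, min(n_photons, n_modes))
--     result = [0] * n_modes
--     for i in order[:k]:
--         result[i] = 1
--     return result
-- ===== Notes on version B (the rewrite author's own statement) =====
-- stated objective: simpler
-- what changed: Replaces A's alternating-pattern list plus running-count while loop with a precomputed placement order (even indices then odd indices) of which the first max(0, min(n_photons, n_modes)) positions are set to 1 in a zero list.
import Mathlib
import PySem

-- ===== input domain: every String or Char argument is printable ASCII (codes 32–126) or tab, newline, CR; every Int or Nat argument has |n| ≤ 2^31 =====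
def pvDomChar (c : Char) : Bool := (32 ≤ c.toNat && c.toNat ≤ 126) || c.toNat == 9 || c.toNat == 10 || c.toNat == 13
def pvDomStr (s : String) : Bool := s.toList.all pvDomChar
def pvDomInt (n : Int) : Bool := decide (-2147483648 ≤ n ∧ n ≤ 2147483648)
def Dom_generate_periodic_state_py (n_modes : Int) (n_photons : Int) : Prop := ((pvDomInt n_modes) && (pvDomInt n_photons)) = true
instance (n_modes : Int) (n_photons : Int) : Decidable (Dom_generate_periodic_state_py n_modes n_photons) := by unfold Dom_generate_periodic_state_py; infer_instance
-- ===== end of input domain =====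

-- B replaces A's alternating-pattern list plus running-count while loop with a precomputed
-- placement order (even indices, then odd indices), setting the first max(0, min(n_photons, n_modes))
-- of them to 1 in a zero list; objective: simpler.

-- ===== PORT A =====
-- the while loop of A; `pyGetD … 1` is exact here: on every reachable state the index is in
-- range (proved in pvA_loop_spec below), so Python's bits[idx] never raises and the default is unused
def pvA_loop (n_modes n_photons : Int) (bits : List Int) (count idx : Int) : List Int :=
  if h : count < n_photons ∧ idx < n_modes then
    -- `bits'` is `bits` after the conditional `bits.append(0)` (inlined `let`)
    if PySem.List.pyGetD (if (bits.length : Int) ≤ idx then bits ++ [0] else bits) idx 1 == 0 then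
      pvA_loop n_modes n_photons
        (PySem.List.pySetD (if (bits.length : Int) ≤ idx then bits ++ [0] else bits) idx 1)
        (count + 1) (idx + 1)
    else
      pvA_loop n_modes n_photons (if (bits.length : Int) ≤ idx then bits ++ [0] else bits)
        count (idx + 1)
  else bits
termination_by (n_modes - idx).toNat
decreasing_by all_goals (simp_wf; omega)

def generate_periodic_state_py (n_modes : Int) (n_photons : Int) : List Int :=
  if n_photons == 0 then List.replicate n_modes.toNat 0
  else
    let bits := (PySem.List.pyRange 0 (min (n_photons * 2) n_modes) 1).map
      (fun idx => if PySem.Int.mod idx 2 == 0 then (1 : Int) else 0)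
    let count := bits.sum
    let bits2 := pvA_loop n_modes n_photons bits count 0
    bits2 ++ List.replicate (n_modes - (bits2.length : Int)).toNat 0

-- ===== PORT B =====
def generate_periodic_state_py_alt (n_modes : Int) (n_photons : Int) : List Int :=
  let order := PySem.List.pyRange 0 n_modes 2 ++ PySem.List.pyRange 1 n_modes 2
  let k := max 0 (min n_photons n_modes)
  let result := List.replicate n_modes.toNat 0
  (PySem.List.slice order none (some k)).foldl (fun r i => PySem.List.pySetD r i 1) result

-- ===== PRECONDITION & SPEC =====
def Spec_generate_periodic_state_py (n_modes : Int) (n_photons : Int) (out : List Int) : Prop := out = generate_periodic_state_py_alt n_modes n_photons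
instance (n_modes : Int) (n_photons : Int) (out : List Int) : Decidable (Spec_generate_periodic_state_py n_modes n_photons out) := by unfold Spec_generate_periodic_state_py; infer_instance

-- ===== CLAIM (what is proved, stated in full; the proofs are below) =====
def Claim_equal_generate_periodic_state_py : Prop := ∀ (n_modes : Int) (n_photons : Int), Dom_generate_periodic_state_py n_modes n_photons → Spec_generate_periodic_state_py n_modes n_photons (generate_periodic_state_py n_modes n_photons)

-- ===== LEMMAS AND PROOFS =====

-- the common model: position j holds a photon iff j is among the first K of
-- "even positions ascending, then odd positions ascending" over L positions
def pvOne (L K j : Nat) : Int :=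
  if (j % 2 = 0 ∧ j / 2 < K) ∨ (j % 2 = 1 ∧ (L + 1) / 2 + j / 2 < K) then 1 else 0

def pvModel (m p : Int) : List Int :=
  (List.range m.toNat).map (fun j => pvOne m.toNat (max 0 (min p m)).toNat j)

lemma pvModel_length (m p : Int) : (pvModel m p).length = m.toNat := by
  simp [pvModel]

lemma pvModel_getElem (m p : Int) (j : Nat) (hj : j < m.toNat) :
    (pvModel m p)[j]'(by simpa [pvModel] using hj) = pvOne m.toNat (max 0 (min p m)).toNat j := by
  simp [pvModel]

lemma pvModel_zero (m p : Int) (hp : p ≤ 0) : pvModel m p = List.replicate m.toNat 0 := by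
  apply List.ext_getElem
  · simp [pvModel_length]
  · intro j h1 h2
    rw [pvModel_getElem m p j (by simpa [pvModel_length] using h1)]
    have hK : (max 0 (min p m)).toNat = 0 := by omega
    simp only [List.getElem_replicate, pvOne, hK]
    rw [if_neg]
    omega

lemma pv_countP_even (n : Nat) :
    (List.range n).countP ((fun idx => PySem.Int.mod idx 2 == 0) ∘ fun k : Nat => (0 : Int) + (k : Int)) = (n + 1) / 2 := by
  induction n with
  | zero => simp
  | succ n ih =>
    rw [List.range_succ, List.countP_append, ih]
    simp only [List.countP_cons, List.countP_nil, Function.comp]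
    by_cases h : n % 2 = 0
    · have hm : PySem.Int.mod ((0 : Int) + (n : Nat)) 2 = 0 := by
        rw [PySem.Int.mod_eq_emod_of_pos (by norm_num)]; omega
      simp only [hm]
      norm_num; omega
    · have hm : PySem.Int.mod ((0 : Int) + (n : Nat)) 2 = 1 := by
        rw [PySem.Int.mod_eq_emod_of_pos (by norm_num)]; omega
      simp only [hm]
      norm_num; omega

-- A's while loop, characterised by its invariant
lemma pvA_loop_spec (m p : Int) :
    ∀ (d : Nat) (i : Int) (bits : List Int) (c : Int),
    (m - i).toNat ≤ d → 0 ≤ i → i ≤ m →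
    bits.length = m.toNat →
    (∀ j (hj : j < bits.length), bits[j] = if j % 2 = 0 ∨ (j : Int) < i then 1 else 0) →
    c = (m + 1) / 2 + i / 2 → c ≤ p →
    (pvA_loop m p bits c i).length = m.toNat ∧
    ∀ j : Nat, j < m.toNat →
      (pvA_loop m p bits c i)[j]? = some (if j % 2 = 0 ∨ (m + 1) / 2 + (j : Int) / 2 < p then 1 else 0) := by
  intro d
  induction d with
  | zero =>
    intro i bits c hd h0 him hlen hinv hc hcp
    have him' : i = m := by omega
    rw [pvA_loop, dif_neg (by omega : ¬ (c < p ∧ i < m))]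
    refine ⟨hlen, ?_⟩
    intro j hj
    rw [List.getElem?_eq_getElem (by omega), Option.some_inj, hinv j (by omega)]
    have hjm : (j : Int) < i := by omega
    rw [if_pos (Or.inr hjm)]
    by_cases he : j % 2 = 0
    · rw [if_pos (Or.inl he)]
    · rw [if_pos (Or.inr (by omega))]
  | succ d ih =>
    intro i bits c hd h0 him hlen hinv hc hcp
    rw [pvA_loop]
    by_cases hcond : c < p ∧ i < m
    · rw [dif_pos hcond]
      have hnoapp : ¬ ((bits.length : Int) ≤ i) := by omega
      simp only [if_neg hnoapp]
      have hilt : i.toNat < bits.length := by omega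
      have hget : PySem.List.pyGetD bits i 1 = bits[i.toNat] := by
        rw [PySem.List.pyGetD_of_nonneg _ _ h0]
        exact List.getD_eq_getElem _ _ hilt
      by_cases hieven : i % 2 = 0
      · have hvb : bits[i.toNat] = 1 := by
          rw [hinv i.toNat hilt]; exact if_pos (Or.inl (by omega))
        rw [if_neg (show ¬ ((PySem.List.pyGetD bits i 1 == 0) = true) by
          rw [hget, hvb]; decide)]
        apply ih (i + 1) bits c (by omega) (by omega) (by omega) hlen _ (by omega) hcp
        intro j hj
        rw [hinv j hj]
        by_cases hcase : j % 2 = 0 ∨ (j : Int) < i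
        · rw [if_pos hcase, if_pos (by omega)]
        · rw [if_neg hcase, if_neg (by omega)]
      · have hvb : bits[i.toNat] = 0 := by
          rw [hinv i.toNat hilt]; exact if_neg (by omega)
        rw [if_pos (show ((PySem.List.pyGetD bits i 1 == 0) = true) by
          rw [hget, hvb]; decide)]
        rw [PySem.List.pySetD_of_nonneg _ _ h0]
        apply ih (i + 1) (bits.set i.toNat 1) (c + 1) (by omega) (by omega) (by omega)
          (by simpa using hlen) _ (by omega) (by omega)
        intro j hj
        have hj' : j < bits.length := by simpa using hj
        rw [List.getElem_set]
        by_cases hji : i.toNat = j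
        · rw [if_pos hji, if_pos (Or.inr (by omega))]
        · rw [if_neg hji, hinv j hj']
          by_cases hcase : j % 2 = 0 ∨ (j : Int) < i
          · rw [if_pos hcase, if_pos (by omega)]
          · rw [if_neg hcase, if_neg (by omega)]
    · rw [dif_neg hcond]
      refine ⟨hlen, ?_⟩
      intro j hj
      rw [List.getElem?_eq_getElem (by omega), Option.some_inj, hinv j (by omega)]
      by_cases he : j % 2 = 0
      · rw [if_pos (Or.inl he), if_pos (Or.inl he)]
      · by_cases hji : (j : Int) < i
        · rw [if_pos (Or.inr hji), if_pos (Or.inr (by omega))]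
        · rw [if_neg (by omega), if_neg (by omega)]

-- B's fold of in-place sets, characterised pointwise
lemma pv_foldl_set_getElem? (l : List Int) :
    ∀ (r : List Int), (∀ x ∈ l, 0 ≤ x) → (∀ x ∈ l, x < (r.length : Int)) → ∀ (j : Nat),
    (l.foldl (fun acc i => PySem.List.pySetD acc i 1) r)[j]? =
      if (j : Int) ∈ l then some 1 else r[j]? := by
  induction l with
  | nil => intro r _ _ j; simp
  | cons a l ih =>
    intro r h0 hlt j
    have ha0 : 0 ≤ a := h0 a (by simp)
    have halt : a < (r.length : Int) := hlt a (by simp)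
    simp only [List.foldl_cons]
    rw [PySem.List.pySetD_of_nonneg _ _ ha0]
    rw [ih (r.set a.toNat 1) (fun x hx => h0 x (by simp [hx])) (fun x hx => by
      simpa using hlt x (by simp [hx])) j]
    by_cases hm : (j : Int) ∈ l
    · simp [hm]
    · rw [if_neg hm, List.getElem?_set]
      by_cases hja : a.toNat = j
      · have hmem : (j : Int) ∈ a :: l := by
          have : a = (j : Int) := by omega
          simp [this]
        rw [if_pos hja, if_pos hmem, if_pos (by omega : a.toNat < r.length)]
      · have hnm : (j : Int) ∉ a :: l := by
          simp only [List.mem_cons, not_or]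
          exact ⟨by omega, hm⟩
        rw [if_neg hja, if_neg hnm]

-- B equals the model
lemma pvB_eq_model (m p : Int) : generate_periodic_state_py_alt m p = pvModel m p := by
  rw [show generate_periodic_state_py_alt m p =
    (PySem.List.slice (PySem.List.pyRange 0 m 2 ++ PySem.List.pyRange 1 m 2) none
      (some (max 0 (min p m)))).foldl (fun r i => PySem.List.pySetD r i 1)
      (List.replicate m.toNat 0) from rfl]
  have hk0 : (0 : Int) ≤ max 0 (min p m) := by omega
  by_cases hm : m ≤ 0
  · have h1 : PySem.List.pyRange 0 m 2 = [] := by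
      rw [PySem.List.pyRange_of_pos _ _ (by norm_num)]
      simp [show ¬ ((0:Int) < m) by omega]
    have h2 : PySem.List.pyRange 1 m 2 = [] := by
      rw [PySem.List.pyRange_of_pos _ _ (by norm_num)]
      simp [show ¬ ((1:Int) < m) by omega]
    have h3 : m.toNat = 0 := by omega
    rw [h1, h2, h3, PySem.List.slice_to _ hk0]
    simp [pvModel, h3]
  · replace hm : 0 < m := by omega
    set L : Nat := m.toNat with hL
    set K : Nat := (max 0 (min p m)).toNat with hK
    have hcntE : (if (0:Int) < m then ((m - 0 + 2 - 1) / 2).toNat else 0) = (L + 1) / 2 := by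
      rw [if_pos hm]; omega
    have hcntO : (if (1:Int) < m then ((m - 1 + 2 - 1) / 2).toNat else 0) = L / 2 := by
      by_cases h1m : (1:Int) < m
      · rw [if_pos h1m]; omega
      · rw [if_neg h1m]; omega
    have hE : PySem.List.pyRange 0 m 2 =
        (List.range ((L + 1) / 2)).map (fun k : Nat => (0 : Int) + 2 * (k : Int)) := by
      rw [PySem.List.pyRange_of_pos _ _ (by norm_num), hcntE]
    have hO : PySem.List.pyRange 1 m 2 =
        (List.range (L / 2)).map (fun k : Nat => (1 : Int) + 2 * (k : Int)) := by
      rw [PySem.List.pyRange_of_pos _ _ (by norm_num), hcntO]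
    have hKt : (max 0 (min p m)).toNat = K := rfl
    rw [hE, hO, PySem.List.slice_to _ hk0, hKt, List.take_append,
      ← List.map_take, List.take_range, List.length_map, List.length_range,
      ← List.map_take, List.take_range]
    set l : List Int := (List.range (min K ((L+1)/2))).map (fun k : Nat => (0 : Int) + 2 * (k : Int)) ++
      (List.range (min (K - (L+1)/2) (L/2))).map (fun k : Nat => (1 : Int) + 2 * (k : Int)) with hl
    have hKL : K ≤ L := by omega
    have hmem : ∀ j : Nat, ((j : Int) ∈ l ↔
        (j % 2 = 0 ∧ j / 2 < min K ((L+1)/2)) ∨ (j % 2 = 1 ∧ j / 2 < min (K - (L+1)/2) (L/2))) := by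
      intro j
      simp only [hl, List.mem_append, List.mem_map, List.mem_range]
      constructor
      · rintro (⟨t, ht, hte⟩ | ⟨t, ht, hte⟩)
        · left; omega
        · right; omega
      · rintro (⟨hpar, hlt⟩ | ⟨hpar, hlt⟩)
        · exact Or.inl ⟨j / 2, hlt, by omega⟩
        · exact Or.inr ⟨j / 2, hlt, by omega⟩
    have h0l : ∀ x ∈ l, 0 ≤ x := by
      intro x hx
      simp only [hl, List.mem_append, List.mem_map, List.mem_range] at hx
      rcases hx with ⟨t, _, ht⟩ | ⟨t, _, ht⟩ <;> omega
    have hltl : ∀ x ∈ l, x < ((List.replicate L (0:Int)).length : Int) := by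
      intro x hx
      simp only [hl, List.mem_append, List.mem_map, List.mem_range] at hx
      simp only [List.length_replicate]
      rcases hx with ⟨t, ht, hte⟩ | ⟨t, ht, hte⟩ <;> omega
    apply List.ext_getElem?
    intro j
    rw [pv_foldl_set_getElem? l _ h0l hltl j]
    by_cases hj : j < L
    · have hmod : (pvModel m p)[j]? = some (pvOne L K j) := by
        rw [List.getElem?_eq_getElem (by simp only [pvModel_length]; exact hj)]
        rw [pvModel_getElem m p j (by omega)]
      rw [hmod, List.getElem?_eq_getElem (by simp only [List.length_replicate]; exact hj)]
      simp only [List.getElem_replicate]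
      by_cases hmem' : (j : Int) ∈ l
      · rw [if_pos hmem']
        rw [hmem j] at hmem'
        rw [show pvOne L K j = 1 by unfold pvOne; rw [if_pos]; omega]
      · rw [if_neg hmem']
        rw [hmem j] at hmem'
        rw [show pvOne L K j = 0 by unfold pvOne; rw [if_neg]; omega]
    · have h1 : (pvModel m p)[j]? = none := by
        rw [List.getElem?_eq_none]
        simp only [pvModel_length]; omega
      have h2 : ((List.replicate L (0:Int)))[j]? = none := by
        rw [List.getElem?_eq_none]
        simp only [List.length_replicate]; omega
      have h3 : (j : Int) ∉ l := by
        rw [hmem j]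
        omega
      rw [if_neg h3, h1, h2]

-- A equals the model
lemma pvA_eq_model (m p : Int) : generate_periodic_state_py m p = pvModel m p := by
  by_cases hp0 : p = 0
  · subst hp0
    rw [show generate_periodic_state_py m 0 = List.replicate m.toNat 0 from rfl]
    rw [pvModel_zero m 0 le_rfl]
  · have hne : ¬ ((p == 0) = true) := fun h => hp0 (by simpa using h)
    rw [show generate_periodic_state_py m p =
      (if (p == 0) = true then List.replicate m.toNat 0
       else
        (pvA_loop m p ((PySem.List.pyRange 0 (min (p * 2) m) 1).map
            (fun idx => if PySem.Int.mod idx 2 == 0 then (1 : Int) else 0))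
          ((PySem.List.pyRange 0 (min (p * 2) m) 1).map
            (fun idx => if PySem.Int.mod idx 2 == 0 then (1 : Int) else 0)).sum 0) ++
        List.replicate (m - (((pvA_loop m p ((PySem.List.pyRange 0 (min (p * 2) m) 1).map
            (fun idx => if PySem.Int.mod idx 2 == 0 then (1 : Int) else 0))
          ((PySem.List.pyRange 0 (min (p * 2) m) 1).map
            (fun idx => if PySem.Int.mod idx 2 == 0 then (1 : Int) else 0)).sum 0).length : Nat) : Int)).toNat 0) from rfl,
      if_neg hne]
    by_cases hm : m ≤ 0
    · have hnil : PySem.List.pyRange 0 (min (p * 2) m) 1 = [] :=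
        PySem.List.pyRange_one_eq_nil (by omega)
      rw [hnil]
      simp only [List.map_nil, List.sum_nil]
      rw [pvA_loop, dif_neg (by omega : ¬ ((0:Int) < p ∧ (0:Int) < m))]
      simp [pvModel, show m.toNat = 0 by omega]
    · replace hm : 0 < m := by omega
      by_cases hpneg : p < 0
      · have hnil : PySem.List.pyRange 0 (min (p * 2) m) 1 = [] :=
          PySem.List.pyRange_one_eq_nil (by omega)
        rw [hnil]
        simp only [List.map_nil, List.sum_nil]
        rw [pvA_loop, dif_neg (by omega : ¬ ((0:Int) < p ∧ (0:Int) < m))]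
        rw [pvModel_zero m p (by omega)]
        simp
      · replace hpneg : 0 ≤ p := by omega
        have hp1 : 1 ≤ p := by omega
        set B0 : List Int := (PySem.List.pyRange 0 (min (p * 2) m) 1).map
            (fun idx => if PySem.Int.mod idx 2 == 0 then (1 : Int) else 0) with hB0
        have hsum : B0.sum = (((min (p * 2) m).toNat + 1) / 2 : Nat) := by
          rw [hB0, PySem.List.sum_map_ite_one_zero, PySem.List.pyRange_one, List.countP_map,
            show ((min (p * 2) m) - 0) = min (p * 2) m from by ring, pv_countP_even]
        have hlenB0 : B0.length = (min (p * 2) m).toNat := by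
          simp [hB0, PySem.List.length_pyRange_one]
        have hB0elem : ∀ j : Nat, j < B0.length →
            B0[j]? = some (if (((0 : Int) + (j : Int)) % 2 == 0) = true then 1 else 0) := by
          intro j hj
          rw [hB0] at hj ⊢
          rw [List.getElem?_eq_getElem hj, List.getElem_map, PySem.List.getElem_pyRange_one,
            PySem.Int.mod_eq_emod_of_pos (by norm_num)]
        by_cases h2pm : p * 2 ≤ m
        · -- loop does not run: count already equals n_photons
          have hminv : min (p * 2) m = p * 2 := by omega
          have hcount : B0.sum = p := by rw [hsum]; omega
          rw [hcount, pvA_loop, dif_neg (by omega : ¬ (p < p ∧ (0:Int) < m))]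
          have hKv : (max 0 (min p m)).toNat = p.toNat := by omega
          apply List.ext_getElem?
          intro j
          by_cases hjN : j < B0.length
          · rw [List.getElem?_append_left hjN, hB0elem j hjN]
            have hjm : j < m.toNat := by omega
            rw [List.getElem?_eq_getElem (by simp only [pvModel_length]; exact hjm),
              pvModel_getElem m p j hjm, hKv, Option.some_inj]
            by_cases he : j % 2 = 0
            · rw [if_pos (show (((0:Int) + (j:Int)) % 2 == 0) = true by
                simp only [beq_iff_eq]; omega)]
              rw [show pvOne m.toNat p.toNat j = 1 by
                unfold pvOne; rw [if_pos]; omega]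
            · rw [if_neg (show ¬ ((((0:Int) + (j:Int)) % 2 == 0) = true) by
                simp only [beq_iff_eq]; omega)]
              rw [show pvOne m.toNat p.toNat j = 0 by
                unfold pvOne; rw [if_neg]; omega]
          · by_cases hjm : j < m.toNat
            · rw [List.getElem?_append_right (by omega), List.getElem?_replicate,
                if_pos (by omega : j - B0.length < (m - (B0.length : Int)).toNat)]
              rw [List.getElem?_eq_getElem (by simp only [pvModel_length]; exact hjm),
                pvModel_getElem m p j hjm, hKv, Option.some_inj]
              rw [show pvOne m.toNat p.toNat j = 0 by
                unfold pvOne; rw [if_neg]; omega]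
            · have e1 : (B0 ++ List.replicate (m - (B0.length : Int)).toNat (0:Int)).length ≤ j := by
                simp only [List.length_append, List.length_replicate]; omega
              rw [List.getElem?_eq_none e1, List.getElem?_eq_none (by simp only [pvModel_length]; omega)]
        · -- loop fills odd positions left to right
          replace h2pm : m < p * 2 := by omega
          have hminv : min (p * 2) m = m := by omega
          have hcount : B0.sum = (m + 1) / 2 := by rw [hsum]; omega
          have hlen : B0.length = m.toNat := by rw [hlenB0]; omega
          have hinv : ∀ j (hj : j < B0.length),
              B0[j] = if j % 2 = 0 ∨ (j : Int) < 0 then 1 else 0 := by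
            intro j hj
            have h := hB0elem j hj
            rw [List.getElem?_eq_getElem hj, Option.some_inj] at h
            rw [h]
            by_cases he : j % 2 = 0
            · rw [if_pos (show (((0:Int) + (j:Int)) % 2 == 0) = true by
                simp only [beq_iff_eq]; omega), if_pos (Or.inl he)]
            · rw [if_neg (show ¬ ((((0:Int) + (j:Int)) % 2 == 0) = true) by
                simp only [beq_iff_eq]; omega), if_neg (by omega)]
          obtain ⟨hL2, hP2⟩ := pvA_loop_spec m p (m - 0).toNat 0 B0 B0.sum (by omega)
            (by omega) (by omega) hlen hinv (by rw [hcount]; omega) (by rw [hcount]; omega)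
          apply List.ext_getElem?
          intro j
          by_cases hj : j < m.toNat
          · rw [List.getElem?_append_left (by omega), hP2 j hj]
            rw [List.getElem?_eq_getElem (by simp only [pvModel_length]; exact hj),
              pvModel_getElem m p j hj, Option.some_inj]
            by_cases he : j % 2 = 0
            · rw [if_pos (Or.inl he)]
              rw [show pvOne m.toNat (max 0 (min p m)).toNat j = 1 by
                unfold pvOne; rw [if_pos]; omega]
            · by_cases hlt : (m + 1) / 2 + (j : Int) / 2 < p
              · rw [if_pos (Or.inr hlt)]
                rw [show pvOne m.toNat (max 0 (min p m)).toNat j = 1 by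
                  unfold pvOne; rw [if_pos]; omega]
              · rw [if_neg (by omega)]
                rw [show pvOne m.toNat (max 0 (min p m)).toNat j = 0 by
                  unfold pvOne; rw [if_neg]; omega]
          · have e1 : ((pvA_loop m p B0 B0.sum 0) ++ List.replicate (m - ((pvA_loop m p B0 B0.sum 0).length : Int)).toNat (0:Int)).length ≤ j := by
              simp only [List.length_append, List.length_replicate]; omega
            rw [List.getElem?_eq_none e1, List.getElem?_eq_none (by simp only [pvModel_length]; omega)]

-- ===== VERDICT (by name: the statement is the Claim_ definition above) =====
theorem generate_periodic_state_py_spec : Claim_equal_generate_periodic_state_py := by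
  intro m p _
  unfold Spec_generate_periodic_state_py
  rw [pvA_eq_model, pvB_eq_model]
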